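-- pv_equiv track=rewrite | github.com/pejmangholami/Persian-Event-Detection | PTwEvent.py | DetectRelatedDoc
-- ===== SOURCE A (Python) =====
-- import copy
--
-- def DetectRelated(AllDocumentInWindow,Segment):
--     Segment = Segment.split(' ')
--     IndexToDelete = []
--     RelatedDoc = []
--     for i,post in enumerate(AllDocumentInWindow):
--         if Segment in post:
--             RelatedDoc.append(post)
--             IndexToDelete.append(i)
--
--     for i in reversed(IndexToDelete):
--         del AllDocumentInWindow[i]
--
--     return AllDocumentInWindow,RelatedDoc
--
-- def DetectRelatedDoc(PostsSegments_Windowing,RealisticEvents):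
--
--     RelatedDocuments = []
--
--     for WinNum in range(len(RealisticEvents)):
--         RelatedDocuments.append([])
--         for EventClusterNum in range(len(RealisticEvents[WinNum])):
--             AllDocumentInWindow = copy.deepcopy(PostsSegments_Windowing[WinNum])
--             CurentRelatedDocuments = []
--             for Segment in RealisticEvents[WinNum][EventClusterNum]:
--                 AllDocumentInWindow,RelatedDoc = DetectRelated(AllDocumentInWindow,Segment)
--                 CurentRelatedDocuments = [*CurentRelatedDocuments,*RelatedDoc]
--             RelatedDocuments[-1].append(CurentRelatedDocuments)
--
--     return RelatedDocuments
-- ===== SOURCE B (Python) =====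
-- def DetectRelatedDoc(PostsSegments_Windowing, RealisticEvents):
--     RelatedDocuments = []
--     for WinNum, Clusters in enumerate(RealisticEvents):
--         if not Clusters:
--             RelatedDocuments.append([])
--             continue
--         Docs = PostsSegments_Windowing[WinNum]
--         WindowOut = []
--         for Cluster in Clusters:
--             Keys = [s.split(' ') for s in Cluster]
--             Buckets = [[] for _ in Keys]
--             for doc in Docs:
--                 for j, key in enumerate(Keys):
--                     if key in doc:
--                         Buckets[j].append(doc)
--                         break
--             WindowOut.append([d for b in Buckets for d in b])
--         RelatedDocuments.append(WindowOut)
--     return RelatedDocuments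
-- ===== Notes on version B (the rewrite author's own statement) =====
-- stated objective: alternative
-- what changed: Instead of deep-copying the window's document list per cluster and rescanning-with-deletion it once per cluster segment, B makes a single doc-major pass per cluster, dropping each document into the bucket of the first cluster segment it contains and concatenating the buckets.
import Mathlib
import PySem

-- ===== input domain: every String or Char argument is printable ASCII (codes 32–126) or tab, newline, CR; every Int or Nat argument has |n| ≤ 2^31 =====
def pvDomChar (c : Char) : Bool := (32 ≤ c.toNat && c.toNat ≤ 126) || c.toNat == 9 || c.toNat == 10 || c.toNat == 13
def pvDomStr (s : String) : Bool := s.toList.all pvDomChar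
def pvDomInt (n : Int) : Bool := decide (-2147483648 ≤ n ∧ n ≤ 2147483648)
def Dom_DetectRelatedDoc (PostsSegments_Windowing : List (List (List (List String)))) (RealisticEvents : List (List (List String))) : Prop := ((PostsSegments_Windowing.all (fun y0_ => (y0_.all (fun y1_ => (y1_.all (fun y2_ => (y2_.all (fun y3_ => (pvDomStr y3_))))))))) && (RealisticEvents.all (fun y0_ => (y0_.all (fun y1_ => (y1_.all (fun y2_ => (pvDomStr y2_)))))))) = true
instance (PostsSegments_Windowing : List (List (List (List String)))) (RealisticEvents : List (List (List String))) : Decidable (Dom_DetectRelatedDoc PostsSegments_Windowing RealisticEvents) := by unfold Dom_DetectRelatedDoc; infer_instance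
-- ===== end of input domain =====

-- B replaces A's per-cluster copy + per-segment rescans-with-deletion by a single doc-major
-- pass per cluster that drops each document into the bucket of its first matching cluster
-- segment (objective: alternative — no copying or deletion, each document scanned once per
-- cluster). A mutates only its internal deepcopy, so the inputs are not observably mutated.

-- ===== PORT A =====
-- helper DetectRelated: mutation of the (deep-copied) list is modelled by returning the updated list
def pyDetectRelated (AllDocumentInWindow : List (List (List String))) (Segment : String) :
    List (List (List String)) × List (List (List String)) :=
  let seg := (PySem.Str.split? Segment " ").getD []   -- Segment.split(' '); sep ≠ "" so split? is `some`
  -- first loop: enumerate, collect IndexToDelete and RelatedDoc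
  let st := (PySem.List.enumerate AllDocumentInWindow).foldl
      (fun (st : List Int × List (List (List String))) p =>
        if seg ∈ p.2 then (st.1 ++ [p.1], st.2 ++ [p.2]) else st)
      ([], [])
  -- second loop: for i in reversed(IndexToDelete): del AllDocumentInWindow[i]
  let remaining := st.1.reverse.foldl
      (fun ds i => ((PySem.List.pop? ds i).map Prod.snd).getD ds) AllDocumentInWindow
  (remaining, st.2)

def DetectRelatedDoc (PostsSegments_Windowing : List (List (List (List String)))) (RealisticEvents : List (List (List String))) : List (List (List (List (List String)))) :=
  (PySem.List.enumerate RealisticEvents).foldl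
    (fun acc p =>
      acc ++ [ p.2.foldl
        (fun winAcc cluster =>
          -- AllDocumentInWindow = copy.deepcopy(PostsSegments_Windowing[WinNum])
          -- (total form of the indexing; Pre_ keeps the index in range whenever this line is reached)
          let st := cluster.foldl
            (fun (st : List (List (List String)) × List (List (List String))) s =>
              let pr := pyDetectRelated st.1 s
              (pr.1, st.2 ++ pr.2))
            (PySem.List.pyGetD PostsSegments_Windowing p.1 [], [])
          winAcc ++ [st.2]) [] ])
    []

-- ===== PORT B =====
-- the body of B's inner doc loop: drop doc into the bucket of its first matching key
def pvStep (Keys : List (List String)) (bs : List (List (List (List String)))) (doc : List (List String)) :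
    List (List (List (List String))) :=
  match Keys.findIdx? (fun key => decide (key ∈ doc)) with
  | some j => bs.set j (bs.getD j [] ++ [doc])
  | none => bs

-- one pass over the window's documents, bucketing each by its first matching cluster key
def altBucketize (Keys : List (List String)) (Docs : List (List (List String))) :
    List (List (List (List String))) :=
  Docs.foldl (pvStep Keys) (Keys.map fun _ => [])

def DetectRelatedDoc_alt (PostsSegments_Windowing : List (List (List (List String)))) (RealisticEvents : List (List (List String))) : List (List (List (List (List String)))) :=
  (PySem.List.enumerate RealisticEvents).foldl
    (fun acc p =>
      if p.2 = [] then acc ++ [[]]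
      else
        let Docs := PySem.List.pyGetD PostsSegments_Windowing p.1 []
        acc ++ [ p.2.foldl
          (fun wOut cluster =>
            let keys := cluster.map (fun s => (PySem.Str.split? s " ").getD [])
            wOut ++ [(altBucketize keys Docs).flatten]) [] ])
    []

-- ===== PRECONDITION & SPEC =====
-- Pre_ excludes exactly the inputs where A raises IndexError: a window position carrying a
-- nonempty cluster list but no corresponding entry in PostsSegments_Windowing.
def Pre_DetectRelatedDoc (PostsSegments_Windowing : List (List (List (List String)))) (RealisticEvents : List (List (List String))) : Prop :=
  ∀ p ∈ PySem.List.enumerate RealisticEvents, p.2 ≠ [] → p.1 < (PostsSegments_Windowing.length : Int)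
instance (PostsSegments_Windowing : List (List (List (List String)))) (RealisticEvents : List (List (List String))) : Decidable (Pre_DetectRelatedDoc PostsSegments_Windowing RealisticEvents) := by unfold Pre_DetectRelatedDoc; infer_instance
def pvWitness_DetectRelatedDoc : List (List (List (List String))) × List (List (List String)) :=
  ([[[["a"]], [["b"], ["a"]]]], [[["a"], ["b"]]])

def Spec_DetectRelatedDoc (PostsSegments_Windowing : List (List (List (List String)))) (RealisticEvents : List (List (List String))) (out : List (List (List (List (List String))))) : Prop := out = DetectRelatedDoc_alt PostsSegments_Windowing RealisticEvents
instance (PostsSegments_Windowing : List (List (List (List String)))) (RealisticEvents : List (List (List String))) (out : List (List (List (List (List String))))) : Decidable (Spec_DetectRelatedDoc PostsSegments_Windowing RealisticEvents out) := by unfold Spec_DetectRelatedDoc; infer_instance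

-- ===== CLAIM (what is proved, stated in full; the proofs are below) =====
def Claim_equal_DetectRelatedDoc : Prop := ∀ (PostsSegments_Windowing : List (List (List (List String)))) (RealisticEvents : List (List (List String))), Dom_DetectRelatedDoc PostsSegments_Windowing RealisticEvents → Pre_DetectRelatedDoc PostsSegments_Windowing RealisticEvents → Spec_DetectRelatedDoc PostsSegments_Windowing RealisticEvents (DetectRelatedDoc PostsSegments_Windowing RealisticEvents)

-- ===== LEMMAS AND PROOFS =====

-- index-shift of enumerate
theorem pvEnum_shift {α : Type} (xs : List α) :
    ∀ s : Int, PySem.List.enumerate xs (s + 1) = (PySem.List.enumerate xs s).map (fun p => (p.1 + 1, p.2)) := by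
  induction xs with
  | nil => intro s; simp [PySem.List.enumerate_nil]
  | cons x xs ih => intro s; simp [PySem.List.enumerate_cons, ih]

-- the scan loop of DetectRelated collects exactly the matching docs and their indices
theorem pvScan_eq (k : List String) :
    ∀ (docs : List (List (List String))) (s0 : Int) (is0 : List Int) (rs0 : List (List (List String))),
    (PySem.List.enumerate docs s0).foldl
      (fun (st : List Int × List (List (List String))) p =>
        if k ∈ p.2 then (st.1 ++ [p.1], st.2 ++ [p.2]) else st) (is0, rs0)
    = (is0 ++ ((PySem.List.enumerate docs s0).filter (fun p => decide (k ∈ p.2))).map (·.1),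
       rs0 ++ docs.filter (fun d => decide (k ∈ d))) := by
  intro docs
  induction docs with
  | nil => intro s0 is0 rs0; simp [PySem.List.enumerate_nil]
  | cons d ds ih =>
    intro s0 is0 rs0
    simp only [PySem.List.enumerate_cons, List.foldl_cons, List.filter_cons]
    by_cases h : k ∈ d
    · simp [h, ih]
    · simp [h, ih]

-- del at i+1 of a cons skips the head (for 0 ≤ i)
theorem pvDel_cons_succ {α : Type} (d : α) (l : List α) (i : Int) (hi : 0 ≤ i) :
    ((PySem.List.pop? (d :: l) (i + 1)).map Prod.snd).getD (d :: l)
    = d :: ((PySem.List.pop? l i).map Prod.snd).getD l := by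
  simp only [PySem.List.pop?, PySem.List.pyIdx?]
  have h1 : (0:Int) ≤ i + 1 := by omega
  simp only [hi, h1, if_pos]
  by_cases h : i < (l.length : Int)
  · have h2 : i + 1 < ((d :: l).length : Int) := by simp; omega
    simp [h]
    have hsucc : (i+1).toNat = i.toNat + 1 := by omega
    rw [hsucc]
    have hlt : i.toNat < l.length := by omega
    simp [List.getElem?_eq_getElem hlt, List.eraseIdx_cons_succ]
  · have h2 : ¬ (i + 1 < ((d :: l).length : Int)) := by simp; omega
    simp [h]

-- deleting at indices shifted by one never touches the head
theorem pvDel_fold_succ {α : Type} (d : α) :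
    ∀ (js : List Int) (l : List α), (∀ i ∈ js, 0 ≤ i) →
    ((js.map (· + 1)).foldl (fun ds i => ((PySem.List.pop? ds i).map Prod.snd).getD ds) (d :: l))
    = d :: js.foldl (fun ds i => ((PySem.List.pop? ds i).map Prod.snd).getD ds) l := by
  intro js
  induction js with
  | nil => intro l _; simp
  | cons j js ih =>
    intro l h
    simp only [List.map_cons, List.foldl_cons]
    rw [pvDel_cons_succ d l j (h j (by simp))]
    exact ih _ (fun i hi => h i (by simp [hi]))

-- the collected indices are nonnegative
theorem pvIdx_nonneg (k : List String) (docs : List (List (List String))) :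
    ∀ i ∈ (((PySem.List.enumerate docs 0).filter (fun p => decide (k ∈ p.2))).map (·.1)), 0 ≤ i := by
  intro i hi
  simp only [List.mem_map, List.mem_filter] at hi
  obtain ⟨p, ⟨hp, _⟩, rfl⟩ := hi
  rw [PySem.List.mem_enumerate_iff] at hp
  obtain ⟨m, hm, rfl⟩ := hp
  simp

-- deleting in reverse order the ascending matched indices leaves the non-matching docs
theorem pvDel_eq (k : List String) :
    ∀ (docs : List (List (List String))),
    (((PySem.List.enumerate docs 0).filter (fun p => decide (k ∈ p.2))).map (·.1)).reverse.foldl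
      (fun ds i => ((PySem.List.pop? ds i).map Prod.snd).getD ds) docs
    = docs.filter (fun d => !decide (k ∈ d)) := by
  intro docs
  induction docs with
  | nil => simp [PySem.List.enumerate_nil]
  | cons d ds ih =>
    have hshift : PySem.List.enumerate ds (0 + 1) = (PySem.List.enumerate ds 0).map (fun p => (p.1 + 1, p.2)) :=
      pvEnum_shift ds 0
    set M := (PySem.List.enumerate ds 0).filter (fun p => decide (k ∈ p.2)) with hM
    set L := M.map (·.1) with hL
    have hnn : ∀ i ∈ L.reverse, 0 ≤ i := by
      intro i hi; exact pvIdx_nonneg k ds i (List.mem_reverse.mp hi)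
    have hfm : ((PySem.List.enumerate ds 0).map (fun p => (p.1 + 1, p.2))).filter (fun p => decide (k ∈ p.2))
        = M.map (fun p => (p.1 + 1, p.2)) := by
      rw [hM, List.filter_map]; rfl
    have hmm : (M.map (fun p => (p.1 + 1, p.2))).map (fun x => x.1) = L.map (· + 1) := by
      simp [hL, List.map_map]
    by_cases h : k ∈ d
    · rw [PySem.List.enumerate_cons, hshift]
      simp only [List.filter_cons, h, decide_true, if_pos, hfm, List.map_cons, hmm]
      rw [List.reverse_cons, ← List.map_reverse, List.foldl_append]
      rw [pvDel_fold_succ d L.reverse ds hnn, ih]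
      simp only [List.foldl_cons, List.foldl_nil, PySem.List.pop?_zero_cons]
      simp
    · rw [PySem.List.enumerate_cons, hshift]
      simp only [List.filter_cons, h, decide_false, if_neg, hfm, hmm, Bool.false_eq_true,
        not_false_iff]
      rw [← List.map_reverse, pvDel_fold_succ d L.reverse ds hnn, ih]
      simp

-- characterisation of the helper: it splits the pool into (non-matching, matching)
theorem pvDetectRelated_eq (docs : List (List (List String))) (s : String) :
    pyDetectRelated docs s
    = (docs.filter (fun d => !decide ((PySem.Str.split? s " ").getD [] ∈ d)),
       docs.filter (fun d => decide ((PySem.Str.split? s " ").getD [] ∈ d))) := by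
  unfold pyDetectRelated
  dsimp only
  rw [pvScan_eq ((PySem.Str.split? s " ").getD []) docs 0 [] []]
  dsimp only
  simp only [List.nil_append]
  rw [pvDel_eq]

-- one step of B's doc loop against a cons of keys
theorem pvStep_cons_apply (k : List String) (ks : List (List String))
    (b0 : List (List (List String))) (bs : List (List (List (List String)))) (d : List (List String)) :
    pvStep (k :: ks) (b0 :: bs) d
    = if k ∈ d then (b0 ++ [d]) :: bs else b0 :: pvStep ks bs d := by
  unfold pvStep
  rw [List.findIdx?_cons]
  by_cases h : k ∈ d
  · simp [h]
  · simp only [h, decide_false, Bool.false_eq_true, if_neg, not_false_iff]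
    cases hfi : ks.findIdx? (fun key => decide (key ∈ d)) with
    | none => simp
    | some j => simp [List.set_cons_succ]

-- bucket invariant: the head bucket takes docs matching the first key, the rest recurse on leftovers
theorem pvBucketize_aux (k : List String) (ks : List (List String)) :
    ∀ (docs : List (List (List String))) (b0 : List (List (List String))) (bs : List (List (List (List String)))),
    docs.foldl (pvStep (k :: ks)) (b0 :: bs)
    = (b0 ++ docs.filter (fun d => decide (k ∈ d)))
      :: (docs.filter (fun d => !decide (k ∈ d))).foldl (pvStep ks) bs := by
  intro docs
  induction docs with
  | nil => intro b0 bs; simp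
  | cons d ds ih =>
    intro b0 bs
    rw [List.foldl_cons, pvStep_cons_apply, List.filter_cons, List.filter_cons]
    by_cases h : k ∈ d
    · simp only [h, if_pos, decide_true, Bool.not_true, Bool.false_eq_true, if_neg, not_false_iff]
      rw [ih]
      simp [List.append_assoc]
    · simp only [h, if_neg, not_false_iff, decide_false, Bool.not_false, Bool.false_eq_true, if_pos]
      rw [ih, List.foldl_cons]

theorem pvBucketize_nil (docs : List (List (List String))) : altBucketize [] docs = [] := by
  unfold altBucketize
  induction docs with
  | nil => simp
  | cons d ds ih => rw [List.foldl_cons]; simpa [pvStep] using ih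

theorem pvBucketize_cons (k : List String) (ks : List (List String)) (docs : List (List (List String))) :
    altBucketize (k :: ks) docs
    = (docs.filter (fun d => decide (k ∈ d))) :: altBucketize ks (docs.filter (fun d => !decide (k ∈ d))) := by
  unfold altBucketize
  rw [List.map_cons, pvBucketize_aux]
  simp

-- A's shrinking-pool fold (in its filter form) equals the flattened buckets
theorem pvCluster_eq :
    ∀ (keys : List (List String)) (docs : List (List (List String))) (out : List (List (List String))),
    (keys.foldl
      (fun (st : List (List (List String)) × List (List (List String))) k =>
        (st.1.filter (fun d => !decide (k ∈ d)), st.2 ++ st.1.filter (fun d => decide (k ∈ d))))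
      (docs, out)).2
    = out ++ (altBucketize keys docs).flatten := by
  intro keys
  induction keys with
  | nil => intro docs out; simp [pvBucketize_nil]
  | cons k ks ih =>
    intro docs out
    rw [List.foldl_cons, ih, pvBucketize_cons]
    simp [List.append_assoc]

-- per-cluster equality between the two ports
theorem pvClusterFold_eq (docs : List (List (List String))) (cluster : List String) :
    (cluster.foldl
      (fun (st : List (List (List String)) × List (List (List String))) s =>
        let pr := pyDetectRelated st.1 s
        (pr.1, st.2 ++ pr.2)) (docs, [])).2
    = (altBucketize (cluster.map (fun s => (PySem.Str.split? s " ").getD [])) docs).flatten := by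
  simp only [pvDetectRelated_eq]
  rw [← List.foldl_map (f := fun s => (PySem.Str.split? s " ").getD [])
      (g := fun (st : List (List (List String)) × List (List (List String))) k =>
        (st.1.filter (fun d => !decide (k ∈ d)), st.2 ++ st.1.filter (fun d => decide (k ∈ d))))]
  rw [pvCluster_eq]
  simp

theorem pv_main (P : List (List (List (List String)))) (R : List (List (List String))) :
    DetectRelatedDoc P R = DetectRelatedDoc_alt P R := by
  unfold DetectRelatedDoc DetectRelatedDoc_alt
  apply List.foldl_ext
  intro acc p _
  by_cases hp : p.2 = []
  · simp [hp]
  · rw [if_neg hp]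
    dsimp only
    congr 2
    apply List.foldl_ext
    intro wacc cluster _
    dsimp only
    rw [pvClusterFold_eq]

-- ===== VERDICT (by name: the statement is the Claim_ definition above) =====
theorem DetectRelatedDoc_spec : Claim_equal_DetectRelatedDoc := by
  intro P R _ _
  unfold Spec_DetectRelatedDoc
  exact pv_main P R
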